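-- pv_equiv track=rewrite | github.com/leek-emperor/learning-memory | auto_compact.py | _split_turns
-- ===== SOURCE A (Python) =====
-- from typing import Any, Dict, List
--
-- def _split_turns(messages: List[Dict[str, Any]]) -> List[List[Dict[str, Any]]]:
--     """按 user 消息切成轮次，便于保留最近 N 轮原始对话。"""
--     turns: List[List[Dict[str, Any]]] = []
--     current_turn: List[Dict[str, Any]] = []
--
--     for message in messages:
--         if message.get("role") == "user" and current_turn:
--             turns.append(current_turn)
--             current_turn = [message]
--         else:
--             current_turn.append(message)
--
--     if current_turn:
--         turns.append(current_turn)
--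
--     return turns
-- ===== SOURCE B (Python) =====
-- from typing import Any, Dict, List
--
-- def _split_turns(messages: List[Dict[str, Any]]) -> List[List[Dict[str, Any]]]:
--     """Index-table version: collect turn-boundary indices, then slice."""
--     if not messages:
--         return []
--     starts = [0] + [i for i in range(1, len(messages)) if messages[i].get("role") == "user"]
--     starts.append(len(messages))
--     return [messages[s:e] for s, e in zip(starts, starts[1:])]
-- ===== Notes on version B (the rewrite author's own statement) =====
-- stated objective: alternative
-- what changed: replaces the accumulate-and-flush loop with one pass collecting boundary indices (0 plus every later user-message index) followed by slicing the list between consecutive boundaries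
import Mathlib
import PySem

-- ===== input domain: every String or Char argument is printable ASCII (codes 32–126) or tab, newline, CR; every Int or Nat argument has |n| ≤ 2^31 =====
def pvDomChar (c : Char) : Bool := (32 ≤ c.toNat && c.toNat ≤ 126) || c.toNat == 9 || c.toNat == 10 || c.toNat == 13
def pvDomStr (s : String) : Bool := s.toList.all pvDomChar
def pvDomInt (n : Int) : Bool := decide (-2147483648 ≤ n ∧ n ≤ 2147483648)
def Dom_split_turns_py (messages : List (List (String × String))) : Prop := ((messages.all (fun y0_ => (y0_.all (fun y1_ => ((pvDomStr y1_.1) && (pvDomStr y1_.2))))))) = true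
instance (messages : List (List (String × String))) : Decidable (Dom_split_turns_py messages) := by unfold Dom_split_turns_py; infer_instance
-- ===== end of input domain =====

-- B replaces A's accumulate-and-flush loop by collecting boundary indices and slicing between
-- consecutive boundaries; same cost, different decomposition (objective: alternative).

-- ===== PORT A =====
-- A's loop body (the two branches of the for-loop), named so the proofs can speak about it
def splitStepA (st : List (List (List (String × String))) × List (List (String × String)))
    (message : List (String × String)) :
    List (List (List (String × String))) × List (List (String × String)) :=
  if (PySem.Dict.get? (PySem.Dict.mk message) "role") == some "user" && !st.2.isEmpty then
    (st.1 ++ [st.2], [message])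
  else
    (st.1, st.2 ++ [message])

def split_turns_py (messages : List (List (String × String))) : List (List (List (String × String))) :=
  let st := messages.foldl splitStepA ([], [])
  if !st.2.isEmpty then st.1 ++ [st.2] else st.1

-- ===== PORT B =====
def split_turns_py_alt (messages : List (List (String × String))) : List (List (List (String × String))) :=
  if messages.isEmpty then []
  else
    let n : Int := messages.length
    let starts : List Int :=
      [0] ++ (PySem.List.pyRange 1 n).filter
        (fun i => (PySem.Dict.get? (PySem.Dict.mk (PySem.List.pyGetD messages i [])) "role") == some "user")
    let starts2 := starts ++ [n]
    (starts2.zip (PySem.List.slice starts2 (some 1) none)).map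
      (fun p => PySem.List.slice messages (some p.1) (some p.2))

-- ===== PRECONDITION & SPEC =====
def Spec_split_turns_py (messages : List (List (String × String))) (out : List (List (List (String × String)))) : Prop := out = split_turns_py_alt messages
instance (messages : List (List (String × String))) (out : List (List (List (String × String)))) : Decidable (Spec_split_turns_py messages out) := by unfold Spec_split_turns_py; infer_instance

-- ===== CLAIM (what is proved, stated in full; the proofs are below) =====
def Claim_equal_split_turns_py : Prop := ∀ (messages : List (List (String × String))), Dom_split_turns_py messages → Spec_split_turns_py messages (split_turns_py messages)

-- ===== LEMMAS AND PROOFS =====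

-- is this message a user message?
def pvIsU (m : List (String × String)) : Bool :=
  (PySem.Dict.get? (PySem.Dict.mk m) "role") == some "user"

-- common reference recursion: split `ms` into turns given the (nonempty) current turn `cur`
def pvGo (cur : List (List (String × String))) (ms : List (List (String × String))) :
    List (List (List (String × String))) :=
  match ms with
  | [] => [cur]
  | m :: rest => if pvIsU m then cur :: pvGo [m] rest else pvGo (cur ++ [m]) rest

lemma pvA_char (ms : List (List (String × String))) :
    ∀ (turns : List (List (List (String × String)))) (cur : List (List (String × String))),
      cur ≠ [] →
      (if !(ms.foldl splitStepA (turns, cur)).2.isEmpty then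
          (ms.foldl splitStepA (turns, cur)).1 ++ [(ms.foldl splitStepA (turns, cur)).2]
        else (ms.foldl splitStepA (turns, cur)).1) = turns ++ pvGo cur ms := by
  induction ms with
  | nil =>
    intro turns cur hc
    simp [pvGo, hc]
  | cons m rest ih =>
    intro turns cur hc
    simp only [List.foldl_cons, pvGo]
    by_cases hu : pvIsU m
    · have hstep : splitStepA (turns, cur) m = (turns ++ [cur], [m]) := by
        simp [splitStepA, pvIsU] at hu ⊢
        simp [hu, hc]
      rw [hstep, ih (turns ++ [cur]) [m] (by simp), hu]
      simp
    · have hstep : splitStepA (turns, cur) m = (turns, cur ++ [m]) := by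
        simp [splitStepA, pvIsU] at hu ⊢
        intro h; exact absurd h hu
      rw [hstep, ih turns (cur ++ [m]) (by simp), if_neg hu]

-- slice chain used by B
def pvChain (ms : List (List (String × String))) (l : List Int) :
    List (List (List (String × String))) :=
  (l.zip l.tail).map (fun p => PySem.List.slice ms (some p.1) (some p.2))

-- boundary predicate as B computes it
def pvP (ms : List (List (String × String))) (i : Int) : Bool :=
  (PySem.Dict.get? (PySem.Dict.mk (PySem.List.pyGetD ms i [])) "role") == some "user"

lemma pvChain_cons (ms : List (List (String × String))) (a b : Int) (r : List Int) :
    pvChain ms (a :: b :: r) = PySem.List.slice ms (some a) (some b) :: pvChain ms (b :: r) := by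
  simp [pvChain]

lemma pvP_eq_isU (ms : List (List (String × String))) (b : Nat) (hb : b < ms.length) :
    pvP ms (b : Int) = pvIsU ms[b] := by
  simp [pvP, pvIsU, PySem.List.pyGetD_natCast, List.getD_eq_getElem?_getD, hb]

-- the core correspondence: slices between boundaries compute pvGo
lemma pvG (ms : List (List (String × String))) :
    ∀ (k a b : Nat), b + k = ms.length → a < b →
      (∀ i : Nat, a < i → i < b → pvP ms (i : Int) = false) →
      pvChain ms ((a : Int) ::
          ((PySem.List.pyRange (b : Int) (ms.length : Int)).filter (pvP ms)
            ++ [(ms.length : Int)]))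
        = pvGo ((ms.drop a).take (b - a)) (ms.drop b) := by
  intro k
  induction k with
  | zero =>
    intro a b hk hab _
    have hb : ms.length = b := by omega
    rw [hb]
    have hr : PySem.List.pyRange (b : Int) (b : Int) = [] := by
      rw [PySem.List.pyRange_one]
      simp
    rw [hr]
    simp only [List.filter_nil, List.nil_append, pvChain_cons]
    have hdrop : ms.drop b = [] := by rw [← hb]; simp
    rw [PySem.List.slice_natCast]
    have htake : (List.drop a ms).take (b - a) = List.drop a ms :=
      List.take_of_length_le (by simp; omega)
    simp [pvChain, pvGo, hdrop, htake]
  | succ k ih =>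
    intro a b hk hab hno
    have hbn : b < ms.length := by omega
    have hcons : PySem.List.pyRange (b : Int) (ms.length : Int)
        = (b : Int) :: PySem.List.pyRange ((b : Int) + 1) (ms.length : Int) :=
      PySem.List.pyRange_one_cons (by exact_mod_cast hbn)
    have hcast : ((b : Int) + 1) = ((b + 1 : Nat) : Int) := by push_cast; ring
    have hdb : ms.drop b = ms[b] :: ms.drop (b + 1) := List.drop_eq_getElem_cons hbn
    rw [hcons, hcast, List.filter_cons]
    by_cases hu : pvP ms (b : Int) = true
    · have hu' : pvIsU ms[b] = true := by rw [← pvP_eq_isU ms b hbn]; exact hu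
      rw [if_pos (by simpa using hu)]
      have ihb := ih b (b + 1) (by omega) (by omega) (by intro i h1 h2; omega)
      simp only [List.cons_append]
      rw [pvChain_cons, ihb]
      have hone : (ms.drop b).take (b + 1 - b) = [ms[b]] := by
        rw [hdb, show b + 1 - b = 1 from by omega]
        rfl
      rw [hone, PySem.List.slice_natCast]
      conv_rhs => rw [hdb]
      simp only [pvGo, hu', if_pos]
    · have hu' : pvIsU ms[b] = false := by
        rw [← pvP_eq_isU ms b hbn]; simpa using hu
      rw [if_neg (by simpa using hu)]
      have ihb := ih a (b + 1) (by omega) (by omega)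
        (by intro i h1 h2
            by_cases hib : i = b
            · subst hib; simpa using hu
            · exact hno i h1 (by omega))
      rw [ihb]
      have htake : (ms.drop a).take (b + 1 - a) = (ms.drop a).take (b - a) ++ [ms[b]] := by
        have h1 : b + 1 - a = (b - a) + 1 := by omega
        have h2 : (ms.drop a)[b - a]? = some ms[b] := by
          rw [List.getElem?_drop, List.getElem?_eq_getElem (by omega)]
          congr 2
          omega
        rw [h1, List.take_add_one, h2]
        rfl
      rw [htake]
      conv_rhs => rw [hdb]
      simp only [pvGo, hu']
      simp

-- ===== VERDICT (by name: the statement is the Claim_ definition above) =====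
theorem split_turns_py_spec : Claim_equal_split_turns_py := by
  intro messages _
  unfold Spec_split_turns_py
  cases messages with
  | nil => rfl
  | cons m rest =>
    -- A side
    have hA : split_turns_py (m :: rest) = pvGo [m] rest := by
      have hstep0 : splitStepA ([], []) m = ([], [m]) := by
        simp [splitStepA]
      have h := pvA_char rest [] [m] (by simp)
      rw [List.nil_append] at h
      show (if !(List.foldl splitStepA ([], []) (m :: rest)).2.isEmpty then
          (List.foldl splitStepA ([], []) (m :: rest)).1
            ++ [(List.foldl splitStepA ([], []) (m :: rest)).2]
        else (List.foldl splitStepA ([], []) (m :: rest)).1) = pvGo [m] rest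
      rw [List.foldl_cons, hstep0]
      exact h
    -- B side
    have hB : split_turns_py_alt (m :: rest) = pvGo [m] rest := by
      have hG := pvG (m :: rest) rest.length 0 1 (by simp only [List.length_cons]; omega) (by omega)
        (by intro i h1 h2; omega)
      simp only [List.drop_one, List.drop_zero, List.tail_cons] at hG
      have hsl : (m :: rest).take (1 - 0) = [m] := by simp
      rw [hsl] at hG
      unfold split_turns_py_alt
      rw [if_neg (by simp)]
      simp only [PySem.List.slice_from_one]
      show pvChain (m :: rest)
          ((([0] ++ (PySem.List.pyRange 1 ((m :: rest).length : Int)).filter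
              (fun i => (PySem.Dict.get? (PySem.Dict.mk (PySem.List.pyGetD (m :: rest) i []))
                "role") == some "user")) ++ [((m :: rest).length : Int)])) = pvGo [m] rest
      rw [← hG]
      congr 1
    rw [hA, hB]
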